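-- pv_equiv track=rewrite | github.com/arlankarlos/data_structures_python | search/tabu_search_b.py | gerar_vizinhos
-- ===== SOURCE A (Python) =====
-- itens = [
--     {'peso': 12, 'valor': 4},
--     {'peso': 2, 'valor': 2},
--     {'peso': 1, 'valor': 1},
--     {'peso': 1, 'valor': 2},
--     {'peso': 4, 'valor': 10},
--     {'peso': 1, 'valor': 2},
--     {'peso': 2, 'valor': 1},
--     {'peso': 1, 'valor': 1},
--     {'peso': 2, 'valor': 2},
--     {'peso': 10, 'valor': 15}
-- ]
--
-- capacidade_mochila = 15
--
-- def calcular_valor(solucao):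
--     valor_total = 0
--     peso_total = 0
--     for i in range(len(solucao)):
--         if solucao[i] == 1:
--             valor_total += itens[i]['valor']
--             peso_total += itens[i]['peso']
--     return valor_total, peso_total
--
-- def gerar_vizinhos(solucao_atual):
--     vizinhos = []
--     for i in range(len(solucao_atual)):
--         vizinho = solucao_atual.copy()
--         vizinho[i] = 1 - vizinho[i]  # Troca 0 por 1 ou 1 por 0
--         valor, peso = calcular_valor(vizinho)
--         if peso <= capacidade_mochila:
--             vizinhos.append((vizinho, i))
--     return vizinhos
-- ===== SOURCE B (Python) =====
-- itens = [
--     {'peso': 12, 'valor': 4},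
--     {'peso': 2, 'valor': 2},
--     {'peso': 1, 'valor': 1},
--     {'peso': 1, 'valor': 2},
--     {'peso': 4, 'valor': 10},
--     {'peso': 1, 'valor': 2},
--     {'peso': 2, 'valor': 1},
--     {'peso': 1, 'valor': 1},
--     {'peso': 2, 'valor': 2},
--     {'peso': 10, 'valor': 15}
-- ]
--
-- capacidade_mochila = 15
--
-- pesos = [item['peso'] for item in itens]
--
--
-- def peso_em(i):
--     # positions beyond the item list hold no item and weigh nothing
--     return pesos[i] if i < len(pesos) else 0
--
--
-- def peso_do_bit(bit, peso):
--     return peso if bit == 1 else 0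
--
--
-- def gerar_vizinhos(solucao_atual):
--     # base weight once, then each neighbor's weight by the standard incremental
--     # update: subtract the old bit's contribution, add the new bit's.
--     base = sum(peso_do_bit(bit, peso_em(i)) for i, bit in enumerate(solucao_atual))
--     vizinhos = []
--     for i, bit in enumerate(solucao_atual):
--         novo = 1 - bit
--         peso = base - peso_do_bit(bit, peso_em(i)) + peso_do_bit(novo, peso_em(i))
--         if peso <= capacidade_mochila:
--             vizinho = solucao_atual.copy()
--             vizinho[i] = novo
--             vizinhos.append((vizinho, i))
--     return vizinhos
-- ===== Notes on version B (the rewrite author's own statement) =====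
-- stated objective: alternative
-- what changed: Instead of rebuilding each neighbor's weight with a full calcular_valor rescan, B computes the base weight once and derives each neighbor's weight by the standard incremental update (subtract the old bit's contribution, add the new bit's); the unused value total is never computed. Pre_ excludes exactly the inputs on which A raises IndexError (a 0 or 1 bit at a position past the 10-entry item list); B, which treats positions without an item as weightless, returns normally there.
import Mathlib
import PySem

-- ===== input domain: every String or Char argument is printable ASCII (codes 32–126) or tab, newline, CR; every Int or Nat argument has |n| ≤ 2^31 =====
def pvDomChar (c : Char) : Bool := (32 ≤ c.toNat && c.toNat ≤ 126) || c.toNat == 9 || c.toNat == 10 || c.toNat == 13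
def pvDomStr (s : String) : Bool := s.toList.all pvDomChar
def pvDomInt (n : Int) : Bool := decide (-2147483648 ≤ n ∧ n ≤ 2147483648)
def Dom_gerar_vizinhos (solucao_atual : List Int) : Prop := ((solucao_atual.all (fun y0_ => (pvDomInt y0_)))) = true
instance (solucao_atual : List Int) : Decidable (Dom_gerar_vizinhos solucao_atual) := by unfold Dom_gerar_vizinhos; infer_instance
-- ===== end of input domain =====

-- B replaces per-neighbor full weight rescans by one base-weight pass plus the standard incremental weight update per flip (the unused value total is dropped).


-- ===== PORT A =====
-- module constants: itens as (peso, valor) pairs, capacity 15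
def pvItens : List (Int × Int) :=
  [(12, 4), (2, 2), (1, 1), (1, 2), (4, 10), (1, 2), (2, 1), (1, 1), (2, 2), (10, 15)]
def pvCapacidade : Int := 15

-- itens[i] is ported with pyGetD; Python raises IndexError exactly where that lookup
-- would need the default, and Pre_gerar_vizinhos excludes exactly those inputs.
def calcular_valor (solucao : List Int) : Int × Int :=
  (PySem.List.pyRange 0 (solucao.length : Int) 1).foldl
    (fun acc i =>
      if PySem.List.pyGetD solucao i 0 = 1 then
        (acc.1 + (PySem.List.pyGetD pvItens i (0, 0)).2,
         acc.2 + (PySem.List.pyGetD pvItens i (0, 0)).1)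
      else acc) (0, 0)

def gerar_vizinhos (solucao_atual : List Int) : List (List Int × Int) :=
  (PySem.List.pyRange 0 (solucao_atual.length : Int) 1).foldl
    (fun vizinhos i =>
      let vizinho := PySem.List.pySetD solucao_atual i (1 - PySem.List.pyGetD solucao_atual i 0)
      let vp := calcular_valor vizinho
      if vp.2 ≤ pvCapacidade then vizinhos ++ [(vizinho, i)] else vizinhos) []

-- ===== PORT B =====
def pvPesos : List Int := pvItens.map Prod.fst

-- positions beyond the item list hold no item and weigh nothing
def peso_em (i : Int) : Int := if i < (pvPesos.length : Int) then PySem.List.pyGetD pvPesos i 0 else 0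

def peso_do_bit (bit : Int) (peso : Int) : Int := if bit = 1 then peso else 0

def gerar_vizinhos_alt (solucao_atual : List Int) : List (List Int × Int) :=
  let base := ((PySem.List.enumerate solucao_atual 0).map (fun q => peso_do_bit q.2 (peso_em q.1))).sum
  (PySem.List.enumerate solucao_atual 0).foldl
    (fun vizinhos q =>
      let novo := 1 - q.2
      let peso := base - peso_do_bit q.2 (peso_em q.1) + peso_do_bit novo (peso_em q.1)
      if peso ≤ pvCapacidade then
        vizinhos ++ [(PySem.List.pySetD solucao_atual q.1 novo, q.1)]
      else vizinhos) []

-- ===== PRECONDITION & SPEC =====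
-- A indexes itens (10 entries) at every position holding a 0 or a 1; it raises IndexError
-- exactly when some entry at index ≥ 10 is 0 or 1. Pre_ excludes exactly those inputs.
def Pre_gerar_vizinhos (solucao_atual : List Int) : Prop :=
  ((solucao_atual.drop 10).all (fun b => b ≠ 0 && b ≠ 1)) = true
instance (solucao_atual : List Int) : Decidable (Pre_gerar_vizinhos solucao_atual) := by
  unfold Pre_gerar_vizinhos; infer_instance
def pvWitness_gerar_vizinhos : List Int := [1, 0, 1, 0]

def Spec_gerar_vizinhos (solucao_atual : List Int) (out : List (List Int × Int)) : Prop := out = gerar_vizinhos_alt solucao_atual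
instance (solucao_atual : List Int) (out : List (List Int × Int)) : Decidable (Spec_gerar_vizinhos solucao_atual out) := by unfold Spec_gerar_vizinhos; infer_instance

-- ===== CLAIM (what is proved, stated in full; the proofs are below) =====
def Claim_equal_gerar_vizinhos : Prop := ∀ (solucao_atual : List Int), Dom_gerar_vizinhos solucao_atual → Pre_gerar_vizinhos solucao_atual → Spec_gerar_vizinhos solucao_atual (gerar_vizinhos solucao_atual)

-- ===== LEMMAS AND PROOFS =====

-- weight contribution of position k in solution s (0 beyond itens' 10 entries)
def pvW (s : List Int) (k : Nat) : Int :=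
  if s.getD k 0 = 1 then (pvItens.getD k (0, 0)).1 else 0

theorem pv_peso_em (k : Nat) : peso_em (k : Int) = (pvItens.getD k (0, 0)).1 := by
  unfold peso_em
  by_cases hk : k < pvPesos.length
  · rw [if_pos (by exact_mod_cast hk), PySem.List.pyGetD_natCast]
    unfold pvPesos at hk ⊢
    rw [List.getD_eq_getElem _ _ hk, List.getD_eq_getElem _ _ (by simpa using hk),
        List.getElem_map]
  · rw [if_neg (by exact_mod_cast hk)]
    have hk' : pvItens.length ≤ k := by
      unfold pvPesos at hk; simpa using hk
    simp [List.getD, List.getElem?_eq_none hk']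

theorem pv_peso_do_bit_em (b : Int) (k : Nat) :
    peso_do_bit b (peso_em (k : Int)) = if b = 1 then (pvItens.getD k (0, 0)).1 else 0 := by
  unfold peso_do_bit; rw [pv_peso_em]

theorem pv_sum_map_range (f : Nat → Int) (n : Nat) :
    ((List.range n).map f).sum = ∑ k ∈ Finset.range n, f k := by
  induction n with
  | zero => simp
  | succ m ih => simp [List.range_succ, Finset.sum_range_succ, ih]

theorem pv_cv_fold (s : List Int) (l : List Int) (init : Int × Int) :
    (l.foldl
      (fun acc i =>
        if PySem.List.pyGetD s i 0 = 1 then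
          (acc.1 + (PySem.List.pyGetD pvItens i (0, 0)).2,
           acc.2 + (PySem.List.pyGetD pvItens i (0, 0)).1)
        else acc) init).2
    = init.2 + (l.map (fun i => if PySem.List.pyGetD s i 0 = 1 then (PySem.List.pyGetD pvItens i (0, 0)).1 else 0)).sum := by
  induction l generalizing init with
  | nil => simp
  | cons a t ih => by_cases h : PySem.List.pyGetD s a 0 = 1 <;> simp [h, ih, add_assoc]

theorem pv_cv_snd (s : List Int) :
    (calcular_valor s).2 = ∑ k ∈ Finset.range s.length, pvW s k := by
  unfold calcular_valor
  rw [pv_cv_fold, PySem.List.pyRange_zero_nat, List.map_map, pv_sum_map_range]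
  simp [pvW, PySem.List.pyGetD_natCast, Function.comp]

theorem pv_base_eq (s : List Int) :
    ((PySem.List.enumerate s 0).map (fun q => peso_do_bit q.2 (peso_em q.1))).sum
    = ∑ k ∈ Finset.range s.length, pvW s k := by
  rw [PySem.List.enumerate_eq_map_pyRange s 0, List.map_map,
      PySem.List.len_eq, PySem.List.pyRange_zero_nat, List.map_map, pv_sum_map_range]
  refine Finset.sum_congr rfl (fun k hk => ?_)
  have hk' : k < s.length := Finset.mem_range.1 hk
  simp only [Function.comp]
  rw [pv_peso_do_bit_em, PySem.List.pyGetD_natCast]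
  rfl

theorem pv_getD_set (s : List Int) (k i : Nat) (x : Int) (hi : i < s.length) :
    (s.set k x).getD i 0 = if i = k then (if k < s.length then x else s.getD i 0) else s.getD i 0 := by
  rw [List.getD_eq_getElem _ _ (by simpa using hi), List.getD_eq_getElem _ _ hi]
  rw [List.getElem_set]
  split_ifs <;> first | rfl | omega

theorem pv_P_set (s : List Int) (k : Nat) (x : Int) (hk : k < s.length) :
    ∑ i ∈ Finset.range (s.set k x).length, pvW (s.set k x) i
    = (∑ i ∈ Finset.range s.length, pvW s i) - pvW s k
      + (if x = 1 then (pvItens.getD k (0, 0)).1 else 0) := by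
  rw [List.length_set]
  have hmem : k ∈ Finset.range s.length := Finset.mem_range.2 hk
  rw [← Finset.add_sum_erase _ (fun i => pvW (s.set k x) i) hmem,
      ← Finset.add_sum_erase _ (fun i => pvW s i) hmem]
  have hrest : ∑ i ∈ (Finset.range s.length).erase k, pvW (s.set k x) i
      = ∑ i ∈ (Finset.range s.length).erase k, pvW s i := by
    refine Finset.sum_congr rfl (fun i hi => ?_)
    have hik : i ≠ k := Finset.ne_of_mem_erase hi
    have hilt : i < s.length := Finset.mem_range.1 (Finset.mem_of_mem_erase hi)
    unfold pvW
    rw [pv_getD_set s k i x hilt, if_neg hik]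
  rw [hrest]
  have hWk : pvW (s.set k x) k = (if x = 1 then (pvItens.getD k (0, 0)).1 else 0) := by
    unfold pvW
    rw [pv_getD_set s k k x hk, if_pos rfl, if_pos hk]
  rw [hWk]; ring

-- the per-neighbor weight identity: A's full rescan equals B's base + incremental update
theorem pv_weight (s : List Int) (j : Int) (h0 : 0 ≤ j) (hj : j < (s.length : Int)) :
    (calcular_valor (PySem.List.pySetD s j (1 - PySem.List.pyGetD s j 0))).2
    = (∑ i ∈ Finset.range s.length, pvW s i)
      - peso_do_bit (PySem.List.pyGetD s j 0) (peso_em j)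
      + peso_do_bit (1 - PySem.List.pyGetD s j 0) (peso_em j) := by
  have hk : j.toNat < s.length := by omega
  have hjj : (j.toNat : Int) = j := by omega
  have hget : PySem.List.pyGetD s j 0 = s.getD j.toNat 0 := by
    conv_lhs => rw [← hjj]
    rw [PySem.List.pyGetD_natCast]
  conv_lhs => rw [← hjj]
  rw [PySem.List.pySetD_natCast, PySem.List.pyGetD_natCast, pv_cv_snd,
      pv_P_set s j.toNat _ hk, hget, ← hjj, pv_peso_do_bit_em, pv_peso_do_bit_em]
  simp only [Int.toNat_natCast]
  unfold pvW
  split_ifs <;> omega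

theorem pv_loops_eq (s : List Int) (base : Int)
    (hbase : base = ∑ i ∈ Finset.range s.length, pvW s i)
    (l : List Int) (hl : ∀ j ∈ l, 0 ≤ j ∧ j < (s.length : Int))
    (acc : List (List Int × Int)) :
    l.foldl (fun vizinhos i =>
      let vizinho := PySem.List.pySetD s i (1 - PySem.List.pyGetD s i 0)
      let vp := calcular_valor vizinho
      if vp.2 ≤ pvCapacidade then vizinhos ++ [(vizinho, i)] else vizinhos) acc
    = l.foldl (fun vizinhos j =>
      let novo := 1 - PySem.List.pyGetD s j 0
      let peso := base - peso_do_bit (PySem.List.pyGetD s j 0) (peso_em j)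
        + peso_do_bit novo (peso_em j)
      if peso ≤ pvCapacidade then
        vizinhos ++ [(PySem.List.pySetD s j novo, j)]
      else vizinhos) acc := by
  induction l generalizing acc with
  | nil => rfl
  | cons a t ih =>
    simp only [List.foldl_cons]
    obtain ⟨h0, hlt⟩ := hl a (List.mem_cons_self)
    have hw := pv_weight s a h0 hlt
    rw [← hbase] at hw
    rw [hw]
    exact ih (fun j hj => hl j (List.mem_cons_of_mem _ hj)) _

-- ===== VERDICT (by name: the statement is the Claim_ definition above) =====
theorem gerar_vizinhos_spec : Claim_equal_gerar_vizinhos := by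
  intro s _ _
  unfold Spec_gerar_vizinhos gerar_vizinhos gerar_vizinhos_alt
  rw [pv_base_eq s]
  rw [PySem.List.enumerate_eq_map_pyRange s 0, List.foldl_map]
  simp only [PySem.List.len_eq]
  exact pv_loops_eq s _ rfl _ (fun j hj => by
    rw [PySem.List.mem_pyRange_one] at hj
    simpa using hj) []
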